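-- pv_equiv track=rewrite | github.com/Foxbat-alt/1st-project | session-0/question.py | first_triangle_with_over_divisors
-- ===== SOURCE A (Python) =====
-- import math
--
-- def count_divisors(n: int) -> int:
--     """Return number of divisors of n by prime factorization via trial division."""
--     if n <= 1:
--         return 1
--     count = 1
--     x = n
--
--     # factor out 2
--     exp = 0
--     while x % 2 == 0:
--         x //= 2
--         exp += 1
--     if exp:
--         count *= (exp + 1)
--
--     # factor odd numbers
--     f = 3
--     limit = int(math.isqrt(x)) + 1
--     while f <= limit and x > 1:
--         exp = 0
--         while x % f == 0:
--             x //= f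
--             exp += 1
--             limit = int(math.isqrt(x)) + 1
--         if exp:
--             count *= (exp + 1)
--         f += 2
--
--     # if remainder is a prime
--     if x > 1:
--         count *= 2
--
--     return count
--
-- def first_triangle_with_over_divisors(target_divisors: int = 500) -> int:
--     """Return the first triangle number that has more than target_divisors divisors."""
--     k = 1
--     while True:
--         # triangle number T_k = k*(k+1)//2
--         # since gcd(k, k+1) == 1, compute divisors of k and k+1 separately,
--         # but divide the even one by 2 to account for the /2 in T_k.
--         if k % 2 == 0:
--             a = k // 2
--             b = k + 1
--         else:
--             a = k
--             b = (k + 1) // 2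
--
--         divisors = count_divisors(a) * count_divisors(b)
--         if divisors > target_divisors:
--             return k * (k + 1) // 2
--         k += 1
-- ===== SOURCE B (Python) =====
-- import math
--
-- def first_triangle_with_over_divisors(target_divisors: int = 500) -> int:
--     """Return the first triangle number that has more than target_divisors divisors.
--
--     Different strategy: T_k = f(k)*f(k+1) with f(m) = m//2 if m even else m, and
--     gcd(f(k), f(k+1)) == 1, so d(T_k) = tau(f(k)) * tau(f(k+1)).  tau counts
--     divisors by enumerating divisor pairs up to isqrt(m) (no factorization;
--     only odd candidates when m is odd), and each tau value is computed once and
--     carried over to the next k instead of being recomputed.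
--     """
--     def tau(m: int) -> int:
--         if m <= 1:
--             return 1
--         r = math.isqrt(m)
--         c = -1 if r * r == m else 0
--         step = 2 if m % 2 else 1
--         for i in range(1, r + 1, step):
--             if m % i == 0:
--                 c += 2
--         return c
--
--     def half_if_even(m: int) -> int:
--         return m // 2 if m % 2 == 0 else m
--
--     k = 1
--     prev = tau(half_if_even(1))
--     while True:
--         cur = tau(half_if_even(k + 1))
--         if prev * cur > target_divisors:
--             return k * (k + 1) // 2
--         k += 1
--         prev = cur
-- ===== Notes on version B (the rewrite author's own statement) =====
-- stated objective: alternative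
-- what changed: A factorizes both coprime parts of T_k=f(k)*f(k+1) by trial division at every k; B instead counts divisors by enumerating divisor pairs up to isqrt(m) (odd candidates only for odd m, no factorization) and computes just one new count per k, carrying the previous count over.
import Mathlib
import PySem

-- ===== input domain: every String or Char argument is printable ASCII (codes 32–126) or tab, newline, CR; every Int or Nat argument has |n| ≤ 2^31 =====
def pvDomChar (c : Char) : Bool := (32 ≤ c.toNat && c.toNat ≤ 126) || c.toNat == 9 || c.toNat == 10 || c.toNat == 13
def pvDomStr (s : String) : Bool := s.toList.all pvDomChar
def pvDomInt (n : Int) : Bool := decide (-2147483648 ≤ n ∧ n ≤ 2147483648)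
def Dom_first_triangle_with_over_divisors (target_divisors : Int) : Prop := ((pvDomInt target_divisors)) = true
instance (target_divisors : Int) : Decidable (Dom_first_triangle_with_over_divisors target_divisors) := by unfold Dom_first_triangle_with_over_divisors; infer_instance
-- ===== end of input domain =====

-- B replaces A's two trial-division factorizations per k by one divisor-pair count
-- per k (the previous count is reused); objective: alternative (same answers).
-- Both `while True` loops are ported with the same large fuel, a totality guard only
-- (the Python loops terminate for every int, and the fuel is far beyond any input a
-- test can run; on fuel exhaustion both ports return 0).

-- ===== PORT A =====

def pvDivideOut (f x : Nat) : Nat × Nat :=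
  if h : 2 ≤ f ∧ x % f = 0 ∧ 0 < x then
    let r := pvDivideOut f (x / f)
    (r.1, r.2 + 1)
  else (x, 0)
termination_by x
decreasing_by exact Nat.div_lt_self h.2.2 (by omega)

theorem pvDivideOut_fst_le (f x : Nat) : (pvDivideOut f x).1 ≤ x := by
  fun_induction pvDivideOut f x with
  | case1 x h r ih => exact le_trans (by simpa using ih) (Nat.div_le_self _ _)
  | case2 => simp

theorem pvDivideOut_snd_zero (f x : Nat) : (pvDivideOut f x).2 = 0 → (pvDivideOut f x).1 = x := by
  rw [pvDivideOut]
  split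
  · intro h; simp at h
  · intro _; rfl

theorem pvDivideOut_fst_lt (f x : Nat) : (pvDivideOut f x).2 ≠ 0 → (pvDivideOut f x).1 < x := by
  rw [pvDivideOut]
  split
  next hc =>
    intro _
    have hle : (pvDivideOut f (x / f)).1 ≤ x / f := pvDivideOut_fst_le f (x / f)
    have : x / f < x := Nat.div_lt_self hc.2.2 (by omega)
    simpa using lt_of_le_of_lt hle this
  next => intro h; simp at h

def pvOddLoop (f limit x count : Nat) : Nat × Nat :=
  if h : f ≤ limit ∧ 1 < x then
    let r := pvDivideOut f x
    let limit' := if r.2 ≠ 0 then Nat.sqrt r.1 + 1 else limit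
    let count' := if r.2 ≠ 0 then count * (r.2 + 1) else count
    pvOddLoop (f + 2) limit' r.1 count'
  else (count, x)
termination_by (x, limit + 2 - f)
decreasing_by
  by_cases he : (pvDivideOut f x).2 = 0
  · have hx1 := pvDivideOut_snd_zero f x he
    simp only [he, ne_eq, not_true_eq_false, dite_false, hx1]
    apply Prod.Lex.right
    omega
  · exact Prod.Lex.left _ _ (pvDivideOut_fst_lt f x he)

def pvCountDivisorsN (n : Nat) : Nat :=
  let r2 := pvDivideOut 2 n
  let count1 := if r2.2 ≠ 0 then r2.2 + 1 else 1
  let r := pvOddLoop 3 (Nat.sqrt r2.1 + 1) r2.1 count1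
  if 1 < r.2 then r.1 * 2 else r.1

-- count_divisors(n); for n ≥ 2 everything in the body is nonnegative, so it is
-- computed on Nat (where Python's // and % coincide with Nat division)
def pvCountDivisors (n : Int) : Int :=
  if n ≤ 1 then 1 else (pvCountDivisorsN n.toNat : Int)

-- the `while True` loop of A, with fuel as a totality guard
def pvLoopA (fuel : Nat) (target k : Int) : Int :=
  match fuel with
  | 0 => 0
  | fuel + 1 =>
    let ab := if PySem.Int.mod k 2 = 0 then (PySem.Int.floordiv k 2, k + 1)
              else (k, PySem.Int.floordiv (k + 1) 2)
    let divisors := pvCountDivisors ab.1 * pvCountDivisors ab.2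
    if target < divisors then PySem.Int.floordiv (k * (k + 1)) 2
    else pvLoopA fuel target (k + 1)

def first_triangle_with_over_divisors (target_divisors : Int) : Int :=
  pvLoopA (2 ^ 63) target_divisors 1

-- ===== PORT B =====

-- tau(m) of B: divisor-pair counting up to isqrt(m) (math.isqrt is Nat.sqrt on m >= 0);
-- only odd candidates i when m is odd, as in Source B
def pvTau (m : Int) : Int :=
  if m ≤ 1 then 1
  else
    let r : Int := (Nat.sqrt m.toNat : Int)
    let c : Int := if r * r = m then -1 else 0
    let step : Int := if PySem.Int.mod m 2 ≠ 0 then 2 else 1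
    (PySem.List.pyRange 1 (r + 1) step).foldl
      (fun c i => if PySem.Int.mod m i = 0 then c + 2 else c) c

def pvHalfIfEven (m : Int) : Int :=
  if PySem.Int.mod m 2 = 0 then PySem.Int.floordiv m 2 else m

-- B's `while True` loop, same fuel guard; prev is tau(half_if_even(k))
def pvLoopB (fuel : Nat) (target k prev : Int) : Int :=
  match fuel with
  | 0 => 0
  | fuel + 1 =>
    let cur := pvTau (pvHalfIfEven (k + 1))
    if target < prev * cur then PySem.Int.floordiv (k * (k + 1)) 2
    else pvLoopB fuel target (k + 1) cur

def first_triangle_with_over_divisors_alt (target_divisors : Int) : Int :=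
  pvLoopB (2 ^ 63) target_divisors 1 (pvTau (pvHalfIfEven 1))

-- ===== PRECONDITION & SPEC =====
def Spec_first_triangle_with_over_divisors (target_divisors : Int) (out : Int) : Prop := out = first_triangle_with_over_divisors_alt target_divisors
instance (target_divisors : Int) (out : Int) : Decidable (Spec_first_triangle_with_over_divisors target_divisors out) := by unfold Spec_first_triangle_with_over_divisors; infer_instance

-- ===== CLAIM (what is proved, stated in full; the proofs are below) =====
def Claim_equal_first_triangle_with_over_divisors : Prop := ∀ (target_divisors : Int), Dom_first_triangle_with_over_divisors target_divisors → Spec_first_triangle_with_over_divisors target_divisors (first_triangle_with_over_divisors target_divisors)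

-- ===== LEMMAS AND PROOFS =====

-- τ: the number-of-divisors function both counters are proved to compute
def pvTauSpec (n : Nat) : Nat := n.divisors.card

-- ---- A's counter computes τ ----

theorem pvDivideOut_spec (f x : Nat) (hf : 2 ≤ f) (hx : 0 < x) :
    x = f ^ (pvDivideOut f x).2 * (pvDivideOut f x).1 ∧
      ¬ f ∣ (pvDivideOut f x).1 ∧ 0 < (pvDivideOut f x).1 := by
  fun_induction pvDivideOut f x with
  | case1 x h r ih =>
    have hdvd : f ∣ x := Nat.dvd_of_mod_eq_zero h.2.1
    have hq : 0 < x / f := Nat.div_pos (Nat.le_of_dvd h.2.2 hdvd) (by omega)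
    obtain ⟨h1, h2, h3⟩ := ih hq
    refine ⟨?_, by simpa using h2, by simpa using h3⟩
    have hmul : f * (x / f) = x := Nat.mul_div_cancel' hdvd
    show x = f ^ ((pvDivideOut f (x/f)).2 + 1) * (pvDivideOut f (x/f)).1
    calc x = f * (x / f) := hmul.symm
      _ = f * (f ^ (pvDivideOut f (x/f)).2 * (pvDivideOut f (x/f)).1) := by rw [← h1]
      _ = f ^ ((pvDivideOut f (x/f)).2 + 1) * (pvDivideOut f (x/f)).1 := by ring
  | case2 x h =>
    refine ⟨by simp, ?_, hx⟩
    intro hdvd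
    exact h ⟨hf, Nat.mod_eq_zero_of_dvd hdvd, hx⟩

theorem pvTau_prime_pow (p e : Nat) (hp : p.Prime) : pvTauSpec (p ^ e) = e + 1 := by
  unfold pvTauSpec
  rw [Nat.divisors_prime_pow hp]
  simp

theorem pvOddLoop_spec (f limit x count : Nat) :
    ∀ m n : Nat, 0 < m → 0 < x → n = m * x → count = pvTauSpec m →
    (∀ p, p.Prime → p ∣ m → p < f) →
    (∀ p, p.Prime → p ∣ x → f ≤ p ∧ p ≠ 2) →
    f % 2 = 1 → 3 ≤ f → limit = Nat.sqrt x + 1 →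
    pvTauSpec n = (pvOddLoop f limit x count).1 * pvTauSpec (pvOddLoop f limit x count).2 ∧
      ((pvOddLoop f limit x count).2 = 1 ∨ Nat.Prime (pvOddLoop f limit x count).2) := by
  fun_induction pvOddLoop f limit x count with
  | case1 f limit x count h r limit' count' ih =>
    intro m n hm hx hn hc hmf hxf hodd hf3 hlim
    obtain ⟨hfac, hndvd, hxpos⟩ := pvDivideOut_spec f x (by omega) hx
    by_cases he : r.2 = 0
    · have hx1 : r.1 = x := pvDivideOut_snd_zero f x he
      have hl' : limit' = limit := by simp [limit', he]
      have hc' : count' = count := by simp [count', he]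
      refine ih m n hm (hx1 ▸ hx) (hx1 ▸ hn) (hc' ▸ hc) (fun p hp hd => by have := hmf p hp hd; omega) ?_ (by omega) (by omega) (by rw [hl', hlim, hx1])
      intro p hp hd
      have hd0 : p ∣ x := hx1 ▸ hd
      obtain ⟨hge, hne2⟩ := hxf p hp hd0
      have hpf : p ≠ f := by intro hpe; rw [hpe] at hd; exact hndvd hd
      have hpodd : p % 2 = 1 := Nat.odd_iff.mp (hp.odd_of_ne_two hne2)
      exact ⟨by omega, hne2⟩
    · have hfd : f ∣ x := hfac ▸ ((dvd_pow_self f he).mul_right r.1)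
      have hfprime : f.Prime := by
        have h1 : f ≠ 1 := by omega
        have hq := Nat.minFac_prime h1
        have hdx : f.minFac ∣ x := (Nat.minFac_dvd f).trans hfd
        have hqf : f.minFac = f :=
          le_antisymm (Nat.minFac_le (by omega)) ((hxf _ hq hdx).1)
        rw [← hqf]; exact hq
      have hco : Nat.Coprime f m :=
        (Nat.Prime.coprime_iff_not_dvd hfprime).mpr
          (fun hd => lt_irrefl f (hmf f hfprime hd))
      have hl' : limit' = Nat.sqrt r.1 + 1 := by simp [limit', he]
      have hc' : count' = count * (r.2 + 1) := by simp [count', he]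
      have htau : pvTauSpec (m * f ^ r.2) = pvTauSpec m * (r.2 + 1) := by
        unfold pvTauSpec
        rw [Nat.Coprime.card_divisors_mul (hco.symm.pow_right _)]
        have := pvTau_prime_pow f r.2 hfprime
        unfold pvTauSpec at this
        rw [this]
      refine ih (m * f ^ r.2) n (by positivity) hxpos ?_ ?_ ?_ ?_ (by omega) (by omega) hl'
      · rw [hn, hfac]; ring
      · rw [hc', hc, htau]
      · intro p hp hd
        rcases (Nat.Prime.dvd_mul hp).mp hd with hdm | hdp
        · have := hmf p hp hdm; omega
        · have : p = f := (Nat.prime_dvd_prime_iff_eq hp hfprime).mp (hp.dvd_of_dvd_pow hdp)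
          omega
      · intro p hp hd
        have hd0 : p ∣ x := by rw [hfac]; exact hd.mul_left _
        obtain ⟨hge, hne2⟩ := hxf p hp hd0
        have hpf : p ≠ f := by intro hpe; rw [hpe] at hd; exact hndvd hd
        have hpodd : p % 2 = 1 := Nat.odd_iff.mp (hp.odd_of_ne_two hne2)
        exact ⟨by omega, hne2⟩
  | case2 f limit x count h =>
    intro m n hm hx hn hc hmf hxf hodd hf3 hlim
    by_cases hx1 : x = 1
    · subst hx1
      constructor
      · show pvTauSpec n = count * pvTauSpec 1
        have : pvTauSpec 1 = 1 := by unfold pvTauSpec; simp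
        rw [this, hn, hc]; simp
      · exact Or.inl rfl
    · have hx2 : 1 < x := by omega
      have hlf : limit < f := by omega
      have hxprime : x.Prime := by
        by_contra hnp
        have hsq : x.minFac ^ 2 ≤ x := Nat.minFac_sq_le_self hx hnp
        have hle : x.minFac ≤ Nat.sqrt x := Nat.le_sqrt.mpr (by nlinarith [hsq])
        have hq := Nat.minFac_prime (by omega : x ≠ 1)
        have := (hxf x.minFac hq (Nat.minFac_dvd x)).1
        omega
      have hco : Nat.Coprime x m :=
        (Nat.Prime.coprime_iff_not_dvd hxprime).mpr
          (fun hd => by have := hmf x hxprime hd; have := (hxf x hxprime dvd_rfl).1; omega)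
      constructor
      · show pvTauSpec n = count * pvTauSpec x
        unfold pvTauSpec
        rw [hn, Nat.Coprime.card_divisors_mul hco.symm, hc]
        rfl
      · exact Or.inr hxprime

theorem pvCountDivisorsN_spec (n : Nat) (hn : 2 ≤ n) : pvCountDivisorsN n = pvTauSpec n := by
  unfold pvCountDivisorsN
  obtain ⟨hfac, hndvd, hxpos⟩ := pvDivideOut_spec 2 n (le_refl 2) (by omega)
  have hcount1 : (if (pvDivideOut 2 n).2 ≠ 0 then (pvDivideOut 2 n).2 + 1 else 1)
      = pvTauSpec (2 ^ (pvDivideOut 2 n).2) := by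
    rw [pvTau_prime_pow 2 _ Nat.prime_two]
    split
    · rfl
    next h => simp at h; rw [h]
  obtain ⟨heq, hdisj⟩ := pvOddLoop_spec 3 (Nat.sqrt (pvDivideOut 2 n).1 + 1) (pvDivideOut 2 n).1
      (if (pvDivideOut 2 n).2 ≠ 0 then (pvDivideOut 2 n).2 + 1 else 1)
      (2 ^ (pvDivideOut 2 n).2) n (by positivity) hxpos hfac hcount1
      (fun p hp hd => by
        have : p = 2 := (Nat.prime_dvd_prime_iff_eq hp Nat.prime_two).mp (hp.dvd_of_dvd_pow hd)
        omega)
      (fun p hp hd => by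
        have hne2 : p ≠ 2 := by
          intro h2; rw [h2] at hd; exact hndvd hd
        have := hp.two_le
        exact ⟨by omega, hne2⟩)
      (by norm_num) (by norm_num) rfl
  rcases hdisj with h1 | hp
  · have h2 : pvTauSpec 1 = 1 := by unfold pvTauSpec; simp
    rw [h1, h2, mul_one] at heq
    rw [if_neg (by omega), heq]
  · have hlt : 1 < (pvOddLoop 3 (Nat.sqrt (pvDivideOut 2 n).1 + 1) (pvDivideOut 2 n).1
      (if (pvDivideOut 2 n).2 ≠ 0 then (pvDivideOut 2 n).2 + 1 else 1)).2 := hp.one_lt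
    rw [heq, if_pos hlt]
    have : pvTauSpec (pvOddLoop 3 (Nat.sqrt (pvDivideOut 2 n).1 + 1) (pvDivideOut 2 n).1
      (if (pvDivideOut 2 n).2 ≠ 0 then (pvDivideOut 2 n).2 + 1 else 1)).2 = 2 := by
      unfold pvTauSpec
      rw [hp.divisors, Finset.card_pair hp.one_lt.ne]
    rw [this]

-- ---- B's counter computes τ ----

theorem pvFoldTwo (q : Int → Prop) [DecidablePred q] (l : List Int) (a : Int) :
    l.foldl (fun c i => if q i then c + 2 else c) a
      = a + 2 * (l.countP (fun i => decide (q i)) : Int) := by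
  induction l generalizing a with
  | nil => simp
  | cons x xs ih =>
    rw [List.foldl_cons, ih, List.countP_cons]
    by_cases hx : q x
    · rw [if_pos hx, if_pos (by simpa using hx)]
      push_cast
      ring
    · rw [if_neg hx, if_neg (by simpa using hx)]
      push_cast
      ring

theorem pvCountP_card (v : Nat) (hv : 2 ≤ v) (step : Int)
    (hstep : step = 1 ∨ (step = 2 ∧ v % 2 = 1)) :
    (PySem.List.pyRange 1 ((Nat.sqrt v : Int) + 1) step).countP
        (fun i => decide (PySem.Int.mod (v : Int) i = 0))
      = (v.divisors.filter (fun d => d * d ≤ v)).card := by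
  have hs : (0 : Int) < step := by rcases hstep with h | ⟨h, _⟩ <;> omega
  set l := PySem.List.pyRange 1 ((Nat.sqrt v : Int) + 1) step with hl
  set p : Int → Bool := fun i => decide (PySem.Int.mod (v : Int) i = 0) with hp
  have hnodup : l.Nodup := by
    rw [hl, PySem.List.pyRange_of_pos _ _ hs]
    refine List.nodup_range.map ?_
    intro a b hab
    have hab' : 1 + step * (a : Int) = 1 + step * (b : Int) := hab
    have h2 : step * (a : Int) = step * (b : Int) := by omega
    exact_mod_cast mul_left_cancel₀ (show step ≠ 0 by omega) h2
  have hcount : l.countP p = (l.filter p).length := by rw [List.countP_eq_length_filter]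
  have hlen : (l.filter p).toFinset.card = (l.filter p).length :=
    List.toFinset_card_of_nodup (hnodup.filter p)
  have himg : (l.filter p).toFinset
      = (v.divisors.filter (fun d => d * d ≤ v)).image (fun d : Nat => (d : Int)) := by
    ext i
    rw [List.mem_toFinset, List.mem_filter, hl, PySem.List.mem_pyRange_iff_of_pos hs]
    simp only [Finset.mem_image, Finset.mem_filter, Nat.mem_divisors, hp, decide_eq_true_eq]
    constructor
    · rintro ⟨⟨h1, h2, _⟩, hpz⟩
      have hdvd : i ∣ (v : Int) := (PySem.Int.mod_eq_zero_iff_dvd _ _).mp hpz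
      have hcast : (i.toNat : Int) = i := by omega
      refine ⟨i.toNat, ⟨⟨?_, by omega⟩, ?_⟩, hcast⟩
      · exact_mod_cast hcast ▸ hdvd
      · exact Nat.le_sqrt.mp (by omega)
    · rintro ⟨d, ⟨⟨hdvd, _⟩, hdd⟩, rfl⟩
      have hd1 : 1 ≤ d := Nat.pos_of_dvd_of_pos hdvd (by omega)
      have hdr : d ≤ Nat.sqrt v := Nat.le_sqrt.mpr hdd
      refine ⟨⟨by exact_mod_cast hd1, by omega, ?_⟩, ?_⟩
      · rcases hstep with h1 | ⟨h2, hvodd⟩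
        · rw [h1]; exact one_dvd _
        · have hd_odd : d % 2 = 1 := by
            by_contra hne
            have h2d : 2 ∣ d := by omega
            have : 2 ∣ v := h2d.trans hdvd
            omega
          rw [h2]
          omega
      · exact (PySem.Int.mod_eq_zero_iff_dvd _ _).mpr (Int.natCast_dvd_natCast.mpr hdvd)
  have hinj : Function.Injective (fun d : Nat => (d : Int)) := fun a b h => by simpa using h
  rw [hcount, ← hlen, himg, Finset.card_image_of_injective _ hinj]

theorem pvSsqCard (v : Nat) (hv : 1 ≤ v) :
    (v.divisors.filter (fun d => d * d = v)).card
      = (if Nat.sqrt v * Nat.sqrt v = v then 1 else 0) := by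
  by_cases hsq : Nat.sqrt v * Nat.sqrt v = v
  · rw [if_pos hsq]
    apply Finset.card_eq_one.mpr
    refine ⟨Nat.sqrt v, ?_⟩
    ext d
    simp only [Finset.mem_filter, Nat.mem_divisors, Finset.mem_singleton]
    constructor
    · rintro ⟨⟨_, _⟩, hdd⟩
      exact Nat.mul_self_inj.mp (by omega)
    · rintro rfl
      exact ⟨⟨⟨Nat.sqrt v, hsq.symm⟩, by omega⟩, hsq⟩
  · rw [if_neg hsq]
    apply Finset.card_eq_zero.mpr
    ext d
    simp only [Finset.mem_filter, Nat.mem_divisors, Finset.notMem_empty, iff_false, not_and]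
    rintro ⟨_, _⟩ hdd
    have hsd : Nat.sqrt (d * d) = d := by rw [← pow_two d, Nat.sqrt_eq']
    exact hsq (by rw [← hdd, hsd])

theorem pvTauCard (v : Nat) (hv : 1 ≤ v) :
    2 * (v.divisors.filter (fun d => d * d ≤ v)).card
      = pvTauSpec v + (if Nat.sqrt v * Nat.sqrt v = v then 1 else 0) := by
  have hm0 : v ≠ 0 := by omega
  have hSsq : (v.divisors.filter (fun d => d * d ≤ v)).filter (fun d => d * d = v)
      = v.divisors.filter (fun d => d * d = v) := by
    rw [Finset.filter_filter]
    apply Finset.filter_congr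
    intro d _
    omega
  have hSlt : (v.divisors.filter (fun d => d * d ≤ v)).filter (fun d => ¬ d * d = v)
      = v.divisors.filter (fun d => d * d < v) := by
    rw [Finset.filter_filter]
    apply Finset.filter_congr
    intro d _
    omega
  have h4 : pvTauSpec v = (v.divisors.filter (fun d => d * d ≤ v)).card
      + (v.divisors.filter (fun d => v < d * d)).card := by
    unfold pvTauSpec
    rw [← Finset.card_filter_add_card_filter_not (s := v.divisors)
      (p := fun d => d * d ≤ v)]
    congr 1
    exact congrArg Finset.card (Finset.filter_congr (fun d _ => by omega))
  have h5 : (v.divisors.filter (fun d => v < d * d)).card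
      = (v.divisors.filter (fun d => d * d < v)).card := by
    apply Finset.card_bij' (fun d _ => v / d) (fun d _ => v / d)
    · intro a ha
      have hmem := Finset.mem_filter.mp ha
      obtain ⟨hdvd, _⟩ := Nat.mem_divisors.mp hmem.1
      have hlt := hmem.2
      have ha0 : 0 < a := Nat.pos_of_dvd_of_pos hdvd (by omega)
      obtain ⟨e, he⟩ := hdvd
      have he0 : 0 < e := by
        rcases Nat.eq_zero_or_pos e with h0 | h0
        · rw [h0, Nat.mul_zero] at he; omega
        · exact h0
      have hq : v / a = e := by rw [he, Nat.mul_div_cancel_left _ ha0]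
      rw [Finset.mem_filter, Nat.mem_divisors, hq]
      refine ⟨⟨Dvd.intro_left a he.symm, hm0⟩, by nlinarith⟩
    · intro a ha
      have hmem := Finset.mem_filter.mp ha
      obtain ⟨hdvd, _⟩ := Nat.mem_divisors.mp hmem.1
      have hlt := hmem.2
      have ha0 : 0 < a := Nat.pos_of_dvd_of_pos hdvd (by omega)
      obtain ⟨e, he⟩ := hdvd
      have he0 : 0 < e := by
        rcases Nat.eq_zero_or_pos e with h0 | h0
        · rw [h0, Nat.mul_zero] at he; omega
        · exact h0
      have hq : v / a = e := by rw [he, Nat.mul_div_cancel_left _ ha0]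
      rw [Finset.mem_filter, Nat.mem_divisors, hq]
      refine ⟨⟨Dvd.intro_left a he.symm, hm0⟩, by nlinarith⟩
    · intro a ha
      have hmem := Finset.mem_filter.mp ha
      obtain ⟨hdvd, _⟩ := Nat.mem_divisors.mp hmem.1
      exact Nat.div_div_self hdvd hm0
    · intro a ha
      have hmem := Finset.mem_filter.mp ha
      obtain ⟨hdvd, _⟩ := Nat.mem_divisors.mp hmem.1
      exact Nat.div_div_self hdvd hm0
  have h6 : (v.divisors.filter (fun d => d * d ≤ v)).card
      = (v.divisors.filter (fun d => d * d = v)).card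
        + (v.divisors.filter (fun d => d * d < v)).card := by
    rw [← hSsq, ← hSlt]
    exact (Finset.card_filter_add_card_filter_not
      (s := v.divisors.filter (fun d => d * d ≤ v)) (p := fun d => d * d = v)).symm
  have hsqc := pvSsqCard v hv
  by_cases hsq : Nat.sqrt v * Nat.sqrt v = v
  · rw [if_pos hsq]; rw [if_pos hsq] at hsqc; omega
  · rw [if_neg hsq]; rw [if_neg hsq] at hsqc; omega

theorem pvTau_eq (m : Int) (hm : 2 ≤ m) : pvTau m = (pvTauSpec m.toNat : Int) := by
  lift m to Nat using (by omega : (0:Int) ≤ m) with v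
  have hv2 : 2 ≤ v := by exact_mod_cast hm
  unfold pvTau
  rw [if_neg (by exact_mod_cast (by omega : ¬ (v:Int) ≤ 1))]
  simp only [Int.toNat_natCast]
  rw [pvFoldTwo (fun i => PySem.Int.mod (v : Int) i = 0)]
  have hstep : (if PySem.Int.mod (v : Int) 2 ≠ 0 then (2:Int) else 1) = 1
      ∨ ((if PySem.Int.mod (v : Int) 2 ≠ 0 then (2:Int) else 1) = 2 ∧ v % 2 = 1) := by
    have hmod : PySem.Int.mod (v : Int) 2 = ((v % 2 : Nat) : Int) := by
      rw [PySem.Int.mod_eq_emod_of_pos (by norm_num)]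
      omega
    by_cases h : PySem.Int.mod (v : Int) 2 ≠ 0
    · right
      refine ⟨by rw [if_pos h], ?_⟩
      rw [hmod] at h
      omega
    · left
      rw [if_neg h]
  rw [pvCountP_card v hv2 _ hstep]
  have hcard := pvTauCard v (by omega)
  by_cases hsq : Nat.sqrt v * Nat.sqrt v = v
  · rw [if_pos (by exact_mod_cast hsq)]
    rw [if_pos hsq] at hcard
    omega
  · rw [if_neg (by exact_mod_cast hsq)]
    rw [if_neg hsq] at hcard
    omega

-- ---- the two counters agree on Int inputs ≥ 1 ----

theorem pvCount_eq_pvTau (j : Int) (_hj : 1 ≤ j) : pvCountDivisors j = pvTau j := by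
  by_cases h1 : j ≤ 1
  · unfold pvCountDivisors pvTau
    rw [if_pos h1, if_pos h1]
  · unfold pvCountDivisors
    rw [if_neg h1, pvCountDivisorsN_spec _ (by omega), pvTau_eq j (by omega)]

-- ---- the two loops agree step for step ----

theorem pvLoop_eq (fuel : Nat) : ∀ target k : Int, 1 ≤ k →
    pvLoopA fuel target k = pvLoopB fuel target k (pvTau (pvHalfIfEven k)) := by
  induction fuel with
  | zero => intro t k hk; rfl
  | succ fuel ih =>
    intro t k hk
    have hmodk : PySem.Int.mod k 2 = k % 2 := PySem.Int.mod_eq_emod_of_pos (by norm_num)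
    have hmodk1 : PySem.Int.mod (k + 1) 2 = (k + 1) % 2 := PySem.Int.mod_eq_emod_of_pos (by norm_num)
    have hdivk : PySem.Int.floordiv k 2 = k / 2 := PySem.Int.floordiv_eq_ediv_of_pos (by norm_num)
    have hdivk1 : PySem.Int.floordiv (k + 1) 2 = (k + 1) / 2 := PySem.Int.floordiv_eq_ediv_of_pos (by norm_num)
    by_cases hk2 : PySem.Int.mod k 2 = 0
    · have e1 : pvHalfIfEven k = PySem.Int.floordiv k 2 := by
        unfold pvHalfIfEven; rw [if_pos hk2]
      have e2 : pvHalfIfEven (k + 1) = k + 1 := by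
        unfold pvHalfIfEven
        rw [if_neg (by rw [hmodk1]; rw [hmodk] at hk2; omega)]
      have p1 : 1 ≤ PySem.Int.floordiv k 2 := by
        rw [hdivk]; rw [hmodk] at hk2; omega
      simp only [pvLoopA, pvLoopB, if_pos hk2]
      rw [pvCount_eq_pvTau _ p1, pvCount_eq_pvTau (k + 1) (by omega), e1, e2]
      by_cases hcond : t < pvTau (PySem.Int.floordiv k 2) * pvTau (k + 1)
      · rw [if_pos hcond, if_pos hcond]
      · rw [if_neg hcond, if_neg hcond]
        have := ih t (k + 1) (by omega)
        rw [e2] at this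
        exact this
    · have e1 : pvHalfIfEven k = k := by unfold pvHalfIfEven; rw [if_neg hk2]
      have e2 : pvHalfIfEven (k + 1) = PySem.Int.floordiv (k + 1) 2 := by
        unfold pvHalfIfEven
        rw [if_pos (by rw [hmodk1]; rw [hmodk] at hk2; omega)]
      have p2 : 1 ≤ PySem.Int.floordiv (k + 1) 2 := by rw [hdivk1]; omega
      simp only [pvLoopA, pvLoopB, if_neg hk2]
      rw [pvCount_eq_pvTau k (by omega), pvCount_eq_pvTau _ p2, e1, e2]
      by_cases hcond : t < pvTau k * pvTau (PySem.Int.floordiv (k + 1) 2)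
      · rw [if_pos hcond, if_pos hcond]
      · rw [if_neg hcond, if_neg hcond]
        have := ih t (k + 1) (by omega)
        rw [e2] at this
        exact this

-- ===== VERDICT (by name: the statement is the Claim_ definition above) =====
theorem first_triangle_with_over_divisors_spec : Claim_equal_first_triangle_with_over_divisors := by
  intro t _
  show first_triangle_with_over_divisors t = first_triangle_with_over_divisors_alt t
  unfold first_triangle_with_over_divisors first_triangle_with_over_divisors_alt
  exact pvLoop_eq (2 ^ 63) t 1 (by norm_num)
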